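-- pv_equiv track=rewrite | github.com/aivo-ai/aivo-virtual-brain | services/slp-svc/app/engine.py | _identify_priority_areas
-- ===== SOURCE A (Python) =====
-- from typing import Dict, Any, List, Optional, Tuple
--
-- def _identify_priority_areas(domain_scores: Dict[str, Dict[str, Any]]) -> List[str]:
--     """Identify priority areas needing immediate attention."""
--     priority_areas = []
--
--     # Identify domains with moderate or severe difficulties
--     for domain, scores in domain_scores.items():
--         if scores["severity_level"] in ["moderate", "severe"]:
--             priority_areas.append(domain)
--
--     # Sort by severity (severe first, then moderate)
--     severe_areas = [domain for domain in priority_areas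
--                    if domain_scores[domain]["severity_level"] == "severe"]
--     moderate_areas = [domain for domain in priority_areas
--                      if domain_scores[domain]["severity_level"] == "moderate"]
--
--     return severe_areas + moderate_areas
-- ===== SOURCE B (Python) =====
-- from typing import Dict, Any, List
--
-- def _identify_priority_areas(domain_scores: Dict[str, Dict[str, Any]]) -> List[str]:
--     """Identify priority areas needing immediate attention (single pass)."""
--     severe = []
--     moderate = []
--     for domain, scores in domain_scores.items():
--         level = scores["severity_level"]
--         if level == "severe":
--             severe.append(domain)
--         elif level == "moderate":
--             moderate.append(domain)
--     return severe + moderate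
-- ===== Notes on version B (the rewrite author's own statement) =====
-- stated objective: simpler
-- what changed: A collects priority domains in one loop and then re-scans that list twice with fresh dict lookups to split severe from moderate; B makes a single pass that appends each domain directly to a severe or moderate bucket and concatenates them, with no second scan and no lookups back into domain_scores.
import Mathlib
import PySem

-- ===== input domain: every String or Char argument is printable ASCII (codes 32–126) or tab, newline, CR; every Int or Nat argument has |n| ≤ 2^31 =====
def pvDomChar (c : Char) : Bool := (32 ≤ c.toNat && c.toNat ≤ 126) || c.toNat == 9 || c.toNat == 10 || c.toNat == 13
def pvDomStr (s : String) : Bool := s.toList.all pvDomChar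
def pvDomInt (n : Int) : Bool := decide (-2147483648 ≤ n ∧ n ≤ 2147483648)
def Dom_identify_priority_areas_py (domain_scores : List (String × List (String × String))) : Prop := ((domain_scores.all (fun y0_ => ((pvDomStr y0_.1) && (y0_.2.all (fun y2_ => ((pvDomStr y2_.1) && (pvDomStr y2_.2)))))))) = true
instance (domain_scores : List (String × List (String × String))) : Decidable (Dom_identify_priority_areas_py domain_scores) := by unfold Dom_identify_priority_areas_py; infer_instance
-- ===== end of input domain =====

-- B replaces A's collect-then-rescan (three passes plus dict lookups) by a single pass into
-- two buckets; objective: simpler, same result.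


-- ===== PORT A =====
-- shared dict-access helper: d[k] for a string→string dict; Pre_ guarantees the key is present,
-- so the "" default is never reached on admitted inputs (Python raises KeyError there).
def pvGetStr (d : List (String × String)) (k : String) : String :=
  ((d.find? (fun q => q.1 == k)).map Prod.snd).getD ""

-- domain_scores[domain] (outer dict lookup; Pre_ guarantees the key is present)
def pvGetOuter (ds : List (String × List (String × String))) (k : String) : List (String × String) :=
  ((ds.find? (fun p => p.1 == k)).map Prod.snd).getD []

def identify_priority_areas_py (domain_scores : List (String × List (String × String))) : List String :=
  let priority_areas := domain_scores.foldl
    (fun acc p => if (["moderate", "severe"] : List String).contains (pvGetStr p.2 "severity_level")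
                  then acc ++ [p.1] else acc) []
  let severe_areas := priority_areas.filter
    (fun d => pvGetStr (pvGetOuter domain_scores d) "severity_level" == "severe")
  let moderate_areas := priority_areas.filter
    (fun d => pvGetStr (pvGetOuter domain_scores d) "severity_level" == "moderate")
  severe_areas ++ moderate_areas

-- ===== PORT B =====
def identify_priority_areas_py_alt (domain_scores : List (String × List (String × String))) : List String :=
  let bk := domain_scores.foldl
    (fun (acc : List String × List String) p =>
      let level := pvGetStr p.2 "severity_level"
      if level == "severe" then (acc.1 ++ [p.1], acc.2)
      else if level == "moderate" then (acc.1, acc.2 ++ [p.1])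
      else acc)
    ([], [])
  bk.1 ++ bk.2

-- ===== PRECONDITION & SPEC =====
-- Pre_ excludes (i) inner dicts lacking the "severity_level" key, where Python A raises KeyError,
-- and (ii) association lists with duplicate outer or inner keys, which do not represent any
-- Python dict (a dict literal collapses duplicates), so A never runs on them.
def Pre_identify_priority_areas_py (domain_scores : List (String × List (String × String))) : Prop :=
  (domain_scores.map Prod.fst).Nodup ∧
  ∀ p ∈ domain_scores, (p.2.map Prod.fst).Nodup ∧ "severity_level" ∈ p.2.map Prod.fst
instance (domain_scores : List (String × List (String × String))) : Decidable (Pre_identify_priority_areas_py domain_scores) := by unfold Pre_identify_priority_areas_py; infer_instance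

def pvWitness_identify_priority_areas_py : (List (String × List (String × String))) :=
  [("speech", [("severity_level", "moderate")]), ("language", [("severity_level", "mild")]),
   ("fluency", [("severity_level", "severe")])]

def Spec_identify_priority_areas_py (domain_scores : List (String × List (String × String))) (out : List String) : Prop := out = identify_priority_areas_py_alt domain_scores
instance (domain_scores : List (String × List (String × String))) (out : List String) : Decidable (Spec_identify_priority_areas_py domain_scores out) := by unfold Spec_identify_priority_areas_py; infer_instance

-- ===== CLAIM (what is proved, stated in full; the proofs are below) =====
def Claim_equal_identify_priority_areas_py : Prop := ∀ (domain_scores : List (String × List (String × String))), Dom_identify_priority_areas_py domain_scores → Pre_identify_priority_areas_py domain_scores → Spec_identify_priority_areas_py domain_scores (identify_priority_areas_py domain_scores)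

-- ===== LEMMAS AND PROOFS =====
def sevP (p : String × List (String × String)) : Bool := pvGetStr p.2 "severity_level" == "severe"
def modP (p : String × List (String × String)) : Bool := pvGetStr p.2 "severity_level" == "moderate"
def condP (p : String × List (String × String)) : Bool :=
  (["moderate", "severe"] : List String).contains (pvGetStr p.2 "severity_level")

lemma foldlA (ds : List (String × List (String × String))) (acc : List String) :
    ds.foldl (fun acc p => if condP p then acc ++ [p.1] else acc) acc
      = acc ++ (ds.filter condP).map Prod.fst := by
  induction ds generalizing acc with
  | nil => simp
  | cons h t ih =>
    by_cases hc : condP h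
    · simp [List.foldl_cons, List.filter_cons, hc, ih]
    · simp [List.foldl_cons, List.filter_cons, hc, ih]

lemma foldlB (ds : List (String × List (String × String))) (a b : List String) :
    ds.foldl
      (fun (acc : List String × List String) p =>
        let level := pvGetStr p.2 "severity_level"
        if level == "severe" then (acc.1 ++ [p.1], acc.2)
        else if level == "moderate" then (acc.1, acc.2 ++ [p.1])
        else acc)
      (a, b)
      = (a ++ (ds.filter sevP).map Prod.fst, b ++ (ds.filter modP).map Prod.fst) := by
  have hfun : (fun (acc : List String × List String) p =>
        let level := pvGetStr p.2 "severity_level"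
        if level == "severe" then (acc.1 ++ [p.1], acc.2)
        else if level == "moderate" then (acc.1, acc.2 ++ [p.1])
        else acc)
      = (fun (acc : List String × List String) p =>
          if sevP p then (acc.1 ++ [p.1], acc.2)
          else if modP p then (acc.1, acc.2 ++ [p.1]) else acc) := rfl
  rw [hfun]
  induction ds generalizing a b with
  | nil => simp
  | cons h t ih =>
    by_cases hs : sevP h = true
    · have hm : modP h = false := by
        unfold sevP at hs; unfold modP; rw [beq_iff_eq] at hs; rw [hs]; decide
      simp only [List.foldl_cons, List.filter_cons, hs, hm, if_true, Bool.false_eq_true, if_false]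
      rw [ih]; simp
    · have hs' : sevP h = false := Bool.eq_false_iff.mpr hs
      by_cases hm : modP h = true
      · simp only [List.foldl_cons, List.filter_cons, hs', hm, if_true, Bool.false_eq_true, if_false]
        rw [ih]; simp
      · have hm' : modP h = false := Bool.eq_false_iff.mpr hm
        simp only [List.foldl_cons, List.filter_cons, hs', hm', Bool.false_eq_true, if_false]
        rw [ih]

lemma lookup_mem (ds : List (String × List (String × String)))
    (hnd : (ds.map Prod.fst).Nodup) (p : String × List (String × String)) (hp : p ∈ ds) :
    pvGetOuter ds p.1 = p.2 := by
  induction ds with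
  | nil => cases hp
  | cons h t ih =>
    simp only [List.map_cons, List.nodup_cons] at hnd
    rcases List.mem_cons.mp hp with hp | hp
    · subst hp; simp [pvGetOuter]
    · have hne : (h.1 == p.1) = false := by
        rw [beq_eq_false_iff_ne]
        intro he
        exact hnd.1 (he ▸ (List.mem_map_of_mem hp))
      unfold pvGetOuter
      rw [List.find?_cons_of_neg (by simp [hne])]
      exact ih hnd.2 hp

lemma mapFilter (ds : List (String × List (String × String)))
    (hnd : (ds.map Prod.fst).Nodup) (s : String)
    (l : List (String × List (String × String))) (hl : ∀ p ∈ l, p ∈ ds) :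
    (l.map Prod.fst).filter (fun d => pvGetStr (pvGetOuter ds d) "severity_level" == s)
      = (l.filter (fun p => pvGetStr p.2 "severity_level" == s)).map Prod.fst := by
  induction l with
  | nil => simp
  | cons h t ih =>
    have hmem : h ∈ ds := hl h (List.mem_cons_self ..)
    have hrest : ∀ p ∈ t, p ∈ ds := fun p hp => hl p (List.mem_cons_of_mem _ hp)
    have hlook := lookup_mem ds hnd h hmem
    simp only [List.map_cons, List.filter_cons, hlook]
    by_cases hc : (pvGetStr h.2 "severity_level" == s) = true
    · simp [hc, ih hrest]
    · simp [hc, ih hrest]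

lemma filter_cond_sev (ds : List (String × List (String × String))) :
    (ds.filter condP).filter sevP = ds.filter sevP := by
  rw [List.filter_filter]
  apply List.filter_congr
  intro p _
  by_cases hs : sevP p
  · have : condP p = true := by
      unfold sevP at hs; unfold condP
      rw [beq_iff_eq] at hs; rw [hs]; decide
    simp [hs, this]
  · simp [Bool.eq_false_iff.mpr hs]

lemma filter_cond_mod (ds : List (String × List (String × String))) :
    (ds.filter condP).filter modP = ds.filter modP := by
  rw [List.filter_filter]
  apply List.filter_congr
  intro p _
  by_cases hm : modP p
  · have : condP p = true := by
      unfold modP at hm; unfold condP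
      rw [beq_iff_eq] at hm; rw [hm]; decide
    simp [hm, this]
  · simp [Bool.eq_false_iff.mpr hm]

-- ===== VERDICT (by name: the statement is the Claim_ definition above) =====
theorem identify_priority_areas_py_spec : Claim_equal_identify_priority_areas_py := by
  intro ds _ hpre
  unfold Spec_identify_priority_areas_py identify_priority_areas_py identify_priority_areas_py_alt
  rw [show (fun (acc : List String) (p : String × List (String × String)) =>
        if (["moderate", "severe"] : List String).contains (pvGetStr p.2 "severity_level")
        then acc ++ [p.1] else acc)
      = (fun acc p => if condP p then acc ++ [p.1] else acc) from rfl]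
  rw [foldlA, foldlB]
  simp only [List.nil_append]
  have hsub : ∀ p ∈ ds.filter condP, p ∈ ds := fun p hp => List.mem_of_mem_filter hp
  rw [mapFilter ds hpre.1 "severe" _ hsub, mapFilter ds hpre.1 "moderate" _ hsub]
  rw [show (fun p : String × List (String × String) => pvGetStr p.2 "severity_level" == "severe") = sevP from rfl]
  rw [show (fun p : String × List (String × String) => pvGetStr p.2 "severity_level" == "moderate") = modP from rfl]
  rw [filter_cond_sev, filter_cond_mod]
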